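-- pv_equiv track=rewrite | github.com/0x4yman/GhostPass | http_handler.py | strip_headers
-- ===== SOURCE A (Python) =====
-- def strip_headers(request_str, headers_to_strip):
--     """
--     Removes the specified header lines from the raw request string.
--     headers_to_strip: list of full header line strings e.g. ["Authorization: Bearer abc"]
--     Returns the modified request as a string.
--     """
--     if not headers_to_strip:
--         return request_str
--
--     # Build a set of lowercase header names to strip
--     names_to_strip = set()
--     for h in headers_to_strip:
--         if ":" in h:
--             names_to_strip.add(h.split(":")[0].strip().lower())
--
--     lines = request_str.split("\n")
--     result = [lines[0]]  # Always keep the request line e.g. GET /path HTTP/1.1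
--     in_headers = True
--
--     for line in lines[1:]:
--         stripped_line = line.strip()
--
--         if in_headers:
--             if not stripped_line:
--                 # Blank line = end of headers, start of body
--                 in_headers = False
--                 result.append(line)
--                 continue
--
--             if ":" in stripped_line:
--                 header_name = stripped_line.split(":")[0].strip().lower()
--                 if header_name in names_to_strip:
--                     continue  # Drop this header line
--
--         result.append(line)
--
--     return "\n".join(result)
-- ===== SOURCE B (Python) =====
-- def strip_headers(request_str, headers_to_strip):
--     """Boundary-split re-implementation: locate the blank line once, then
--     filter only the header block and copy the body verbatim."""
--     if not headers_to_strip: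
--         return request_str
--
--     names = {h.split(":")[0].strip().lower() for h in headers_to_strip if ":" in h}
--
--     lines = request_str.split("\n")
--     rest = lines[1:]
--
--     boundary = len(rest)
--     for i, line in enumerate(rest):
--         if not line.strip():
--             boundary = i
--             break
--
--     headers = [ln for ln in rest[:boundary]
--                if ":" not in ln.strip()
--                or ln.strip().split(":")[0].strip().lower() not in names]
--
--     return "\n".join([lines[0]] + headers + rest[boundary:])
-- ===== Notes on version B (the rewrite author's own statement) =====
-- stated objective: alternative
-- what changed: Replaces A's single stateful pass (in_headers flag threaded through every line) with a boundary-split decomposition: find the first blank line once, filter only the header slice with a set comprehension-built name set, and concatenate request line + filtered headers + verbatim body.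
import Mathlib
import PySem

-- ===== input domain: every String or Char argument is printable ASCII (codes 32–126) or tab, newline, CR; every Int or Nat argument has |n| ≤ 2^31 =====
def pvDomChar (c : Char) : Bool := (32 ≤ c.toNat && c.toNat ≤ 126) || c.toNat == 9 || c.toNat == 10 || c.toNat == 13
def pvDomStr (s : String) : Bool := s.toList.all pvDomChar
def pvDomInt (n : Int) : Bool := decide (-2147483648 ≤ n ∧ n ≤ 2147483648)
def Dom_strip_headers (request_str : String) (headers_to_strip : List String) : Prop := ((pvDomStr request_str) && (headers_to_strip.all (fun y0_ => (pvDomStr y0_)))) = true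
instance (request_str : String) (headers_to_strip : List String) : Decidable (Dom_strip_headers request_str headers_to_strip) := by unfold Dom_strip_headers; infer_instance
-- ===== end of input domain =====

-- B replaces A's single stateful pass (in_headers flag threaded through every line) with a
-- boundary-split decomposition: find the blank line once, filter only the header slice, copy
-- the body verbatim; same asymptotic cost.

-- ===== PORT A =====
-- shared textual expression of both Pythons: h.split(":")[0].strip().lower()
-- (split(":") never returns an empty list, so [0] never raises; headD "" is exact here;
--  ":" ≠ "" so split? is always some and getD [] is exact)
def pvHeaderName (h : String) : String :=
  PySem.Str.lower (PySem.Str.strip (((PySem.Str.split? h ":").getD []).headD ""))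

-- one iteration of A's 'for line in lines[1:]' loop; state = (result, in_headers)
def pvStepA (names : PySem.Set String) (acc : List String × Bool) (line : String) :
    List String × Bool :=
  let stripped := PySem.Str.strip line
  if acc.2 then
    if stripped == "" then (acc.1 ++ [line], false)
    else if PySem.Str.isIn ":" stripped then
      if PySem.Set.contains names (pvHeaderName stripped) then acc
      else (acc.1 ++ [line], acc.2)
    else (acc.1 ++ [line], acc.2)
  else (acc.1 ++ [line], acc.2)

def strip_headers (request_str : String) (headers_to_strip : List String) : String :=
  if headers_to_strip = [] then request_str
  else
    let names : PySem.Set String :=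
      headers_to_strip.foldl
        (fun s h => if PySem.Str.isIn ":" h then PySem.Set.add s (pvHeaderName h) else s)
        PySem.Set.empty
    -- split("\n"): sep ≠ "" so split? is always some; split never returns [], so lines[0] is headD ""
    let lines := (PySem.Str.split? request_str "\n").getD []
    let st := lines.tail.foldl (pvStepA names) ([lines.headD ""], true)
    PySem.Str.join "\n" st.1

-- ===== PORT B =====
def pvBlank (l : String) : Bool := PySem.Str.strip l == ""

def pvKeep (names : PySem.Set String) (ln : String) : Bool :=
  !(PySem.Str.isIn ":" (PySem.Str.strip ln))
    || !(PySem.Set.contains names (pvHeaderName (PySem.Str.strip ln)))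

def strip_headers_alt (request_str : String) (headers_to_strip : List String) : String :=
  if headers_to_strip = [] then request_str
  else
    let names : PySem.Set String :=
      PySem.Set.ofList
        ((headers_to_strip.filter (fun h => PySem.Str.isIn ":" h)).map pvHeaderName)
    let lines := (PySem.Str.split? request_str "\n").getD []
    let rest := lines.tail
    let boundary := rest.findIdx pvBlank
    let headers := (rest.take boundary).filter (pvKeep names)
    PySem.Str.join "\n" (lines.headD "" :: headers ++ rest.drop boundary)

-- ===== PRECONDITION & SPEC =====
def Spec_strip_headers (request_str : String) (headers_to_strip : List String) (out : String) : Prop := out = strip_headers_alt request_str headers_to_strip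
instance (request_str : String) (headers_to_strip : List String) (out : String) : Decidable (Spec_strip_headers request_str headers_to_strip out) := by unfold Spec_strip_headers; infer_instance

-- ===== CLAIM (what is proved, stated in full; the proofs are below) =====
def Claim_equal_strip_headers : Prop := ∀ (request_str : String) (headers_to_strip : List String), Dom_strip_headers request_str headers_to_strip → Spec_strip_headers request_str headers_to_strip (strip_headers request_str headers_to_strip)

-- ===== LEMMAS AND PROOFS =====

-- A's conditional-add loop over headers_to_strip is the fold of Set.add over the filtered, mapped list
lemma pv_names_eq (l : List String) (s : PySem.Set String) :
    l.foldl (fun s h => if PySem.Str.isIn ":" h then PySem.Set.add s (pvHeaderName h) else s) s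
      = ((l.filter (fun h => PySem.Str.isIn ":" h)).map pvHeaderName).foldl PySem.Set.add s := by
  induction l generalizing s with
  | nil => rfl
  | cons h t ih =>
    rw [List.foldl_cons, List.filter_cons]
    by_cases hc : PySem.Str.isIn ":" h = true
    · rw [if_pos hc, if_pos hc, List.map_cons, List.foldl_cons]
      exact ih _
    · rw [if_neg hc, if_neg hc]
      exact ih _

-- once in_headers is false, A copies every remaining line
lemma pv_fold_false (names : PySem.Set String) (rest acc : List String) :
    rest.foldl (pvStepA names) (acc, false) = (acc ++ rest, false) := by
  induction rest generalizing acc with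
  | nil => simp
  | cons l ls ih => simp [pvStepA, ih, List.append_assoc]

-- while in_headers, A keeps exactly the kept header lines up to the blank boundary, then the tail
lemma pv_fold_true (names : PySem.Set String) (rest acc : List String) :
    (rest.foldl (pvStepA names) (acc, true)).1
      = acc ++ (rest.take (rest.findIdx pvBlank)).filter (pvKeep names)
            ++ rest.drop (rest.findIdx pvBlank) := by
  induction rest generalizing acc with
  | nil => simp
  | cons l ls ih =>
    rw [List.foldl_cons, List.findIdx_cons]
    by_cases hb : pvBlank l = true
    · rw [hb]
      have hb' := hb
      simp only [pvBlank] at hb'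
      have hstep : pvStepA names (acc, true) l = (acc ++ [l], false) := by
        simp [pvStepA, hb']
      rw [hstep, pv_fold_false]
      simp
    · have hbf : pvBlank l = false := Bool.eq_false_iff.mpr hb
      rw [hbf]
      have hb' := hbf
      simp [pvBlank] at hb'
      simp only [cond_false, List.take_succ_cons, List.drop_succ_cons, List.filter_cons]
      by_cases hk : pvKeep names l = true
      · have hkc := hk
        simp [pvKeep] at hkc
        have hstep : pvStepA names (acc, true) l = (acc ++ [l], true) := by
          rcases hkc with hkc | hkc
          · simp [pvStepA, hb', hkc]
          · simp [pvStepA, hb', hkc]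
        rw [hstep, ih, if_pos hk]
        simp
      · have hkf : pvKeep names l = false := Bool.eq_false_iff.mpr hk
        have hkc := hkf
        simp [pvKeep] at hkc
        have hstep : pvStepA names (acc, true) l = (acc, true) := by
          simp [pvStepA, hb', hkc.1, hkc.2]
        rw [hstep, ih, if_neg hk]

-- ===== VERDICT (by name: the statement is the Claim_ definition above) =====
theorem strip_headers_spec : Claim_equal_strip_headers := by
  intro request_str headers_to_strip _
  unfold Spec_strip_headers strip_headers strip_headers_alt
  by_cases h0 : headers_to_strip = []
  · rw [if_pos h0, if_pos h0]
  · rw [if_neg h0, if_neg h0]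
    dsimp only
    rw [pv_names_eq, pv_fold_true]
    simp [PySem.Set.ofList_eq_foldl, PySem.Set.empty]
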